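-- pv_equiv track=rewrite | github.com/beertino/question_bank | 2019Prelim/2019PrelimP1_RVHS/T1_sol.py | remove_students
-- ===== SOURCE A (Python) =====
-- def remove_students(cid_student_lst, one_cid_group):
--     # remove records in cid_student_lst based on the name in one_cid_group
--     # return the removed records as a list
--     removed_records = []
--     removed_index_lst = []
--     for i in range(len(cid_student_lst)):
--         if cid_student_lst[i][0] in one_cid_group:
--             removed_index_lst.append(i)
--     count = 0
--     for index in removed_index_lst:
--         removed_records.append(cid_student_lst.pop(index - count))
--         count += 1
--     return removed_records
-- ===== SOURCE B (Python) =====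
-- def remove_students(cid_student_lst, one_cid_group):
--     # Single in-place compaction pass with a write pointer; returns the removed records.
--     removed_records = []
--     write = 0
--     for read in range(len(cid_student_lst)):
--         rec = cid_student_lst[read]
--         if rec[0] in one_cid_group:
--             removed_records.append(rec)
--         else:
--             cid_student_lst[write] = rec
--             write += 1
--     del cid_student_lst[write:]
--     return removed_records
-- ===== Notes on version B (the rewrite author's own statement) =====
-- stated objective: alternative
-- what changed: Replaced A's two passes (collect matching indices, then repeatedly list.pop with a shifting offset) by one in-place compaction pass with a write pointer that truncates the tail at the end; it avoids A's worst-case quadratic popping but was not measurably faster on the generated inputs.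
import Mathlib
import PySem

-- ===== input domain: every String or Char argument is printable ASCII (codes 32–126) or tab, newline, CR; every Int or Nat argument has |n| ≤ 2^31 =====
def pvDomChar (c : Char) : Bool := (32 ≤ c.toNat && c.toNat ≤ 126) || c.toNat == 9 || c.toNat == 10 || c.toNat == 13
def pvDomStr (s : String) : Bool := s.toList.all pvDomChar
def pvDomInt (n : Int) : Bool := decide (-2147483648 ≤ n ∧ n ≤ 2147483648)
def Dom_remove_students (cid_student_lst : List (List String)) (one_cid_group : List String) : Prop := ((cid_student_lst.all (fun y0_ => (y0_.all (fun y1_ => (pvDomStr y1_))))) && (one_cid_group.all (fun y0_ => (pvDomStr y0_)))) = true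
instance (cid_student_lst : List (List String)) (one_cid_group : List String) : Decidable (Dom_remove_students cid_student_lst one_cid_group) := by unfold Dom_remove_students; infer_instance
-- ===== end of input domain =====

-- B replaces A's two-pass collect-indices-then-pop scheme by one in-place write-pointer
-- compaction pass; equivalence proved is about the RETURN value (both Pythons mutate
-- cid_student_lst in place, and they leave it in the same final state).

-- ===== PORT A =====
-- `cid_student_lst[i][0] in one_cid_group`; rec[0] via pyGet? with getD default, exact when rec ≠ []
def pvA_hit (one_cid_group : List String) (record : List String) : Bool :=
  one_cid_group.contains ((PySem.List.pyGet? record 0).getD "")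

-- second loop of A: `for index in removed_index_lst: removed_records.append(lst.pop(index - count)); count += 1`
-- (the `none` branch is Python's IndexError; it is never reached for the index list A builds)
def pvA_popLoop (idxs : List Int) (lst removed : List (List String)) (count : Int) : List (List String) :=
  match idxs with
  | [] => removed
  | i :: rest =>
    match PySem.List.pop? lst (i - count) with
    | some (x, lst') => pvA_popLoop rest lst' (removed ++ [x]) (count + 1)
    | none => removed

def remove_students (cid_student_lst : List (List String)) (one_cid_group : List String) : List (List String) :=
  let removed_index_lst : List Int :=
    (PySem.List.pyRange 0 (cid_student_lst.length : Int) 1).foldl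
      (fun acc i =>
        if pvA_hit one_cid_group ((PySem.List.pyGet? cid_student_lst i).getD []) then acc ++ [i] else acc) []
  pvA_popLoop removed_index_lst cid_student_lst [] 0

-- ===== PORT B =====
-- single pass of Source B over the read indices, maintaining (current list, write pointer, removed)
def pvB_loop (one_cid_group : List String) (reads : List Int) (cur : List (List String))
    (write : Nat) (removed : List (List String)) : List (List String) :=
  match reads with
  | [] => removed
  | r :: rest =>
    let record := (PySem.List.pyGet? cur r).getD []
    if one_cid_group.contains ((PySem.List.pyGet? record 0).getD "") then
      pvB_loop one_cid_group rest cur write (removed ++ [record])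
    else
      pvB_loop one_cid_group rest (cur.set write record) (write + 1) removed

-- `del cid_student_lst[write:]` only truncates the mutated argument; the RETURN value is removed_records
def remove_students_alt (cid_student_lst : List (List String)) (one_cid_group : List String) : List (List String) :=
  pvB_loop one_cid_group (PySem.List.pyRange 0 (cid_student_lst.length : Int) 1) cid_student_lst 0 []

-- ===== PRECONDITION & SPEC =====
-- Pre_ excludes lists containing an empty record, on which Python A raises IndexError at rec[0]
def Pre_remove_students (cid_student_lst : List (List String)) (one_cid_group : List String) : Prop :=
  ∀ rec ∈ cid_student_lst, rec ≠ []
instance (cid_student_lst : List (List String)) (one_cid_group : List String) : Decidable (Pre_remove_students cid_student_lst one_cid_group) := by unfold Pre_remove_students; infer_instance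

def pvWitness_remove_students : List (List String) × List String :=
  ([["amy", "1"], ["bob", "2"], ["cue", "3"]], ["bob", "zed"])

def Spec_remove_students (cid_student_lst : List (List String)) (one_cid_group : List String) (out : List (List String)) : Prop := out = remove_students_alt cid_student_lst one_cid_group
instance (cid_student_lst : List (List String)) (one_cid_group : List String) (out : List (List String)) : Decidable (Spec_remove_students cid_student_lst one_cid_group out) := by unfold Spec_remove_students; infer_instance

-- ===== CLAIM (what is proved, stated in full; the proofs are below) =====
def Claim_equal_remove_students : Prop := ∀ (cid_student_lst : List (List String)) (one_cid_group : List String), Dom_remove_students cid_student_lst one_cid_group → Pre_remove_students cid_student_lst one_cid_group → Spec_remove_students cid_student_lst one_cid_group (remove_students cid_student_lst one_cid_group)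

-- ===== LEMMAS AND PROOFS =====
-- Both sides are proved equal to `lst.filter (pvA_hit g)`.

-- the positions A's first loop collects, as Nats
def pvJ (g : List String) (lst : List (List String)) : List Nat :=
  (List.range lst.length).filter (fun k => pvA_hit g (lst.getD k []))

theorem pvJ_nil (g : List String) : pvJ g [] = [] := by simp [pvJ]

theorem pvJ_cons (g : List String) (x : List String) (xs : List (List String)) :
    pvJ g (x :: xs) = (if pvA_hit g x then [0] else []) ++ (pvJ g xs).map (· + 1) := by
  unfold pvJ
  rw [List.length_cons, List.range_succ_eq_map, List.filter_cons]
  simp [List.filter_map, Function.comp_def]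
  split <;> rfl

theorem pvJ_pairwise (g : List String) (lst : List (List String)) :
    (pvJ g lst).Pairwise (· < ·) :=
  List.Pairwise.filter _ (List.pairwise_lt_range)

theorem pvJ_mem_lt (g : List String) (xs : List (List String)) {k : Nat} (h : k ∈ pvJ g xs) :
    k < xs.length := by
  unfold pvJ at h
  exact List.mem_range.mp (List.mem_of_mem_filter h)

-- popping behind an untouched head: all effective pop indices stay ≥ 1 and in range
theorem pvA_popLoop_shift (idxs : List Int) (x : List String)
    (l removed : List (List String)) (c : Int)
    (hp : idxs.Pairwise (· < ·)) (hlo : ∀ i ∈ idxs, c + 1 ≤ i) (hhi : ∀ i ∈ idxs, i ≤ c + l.length) :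
    pvA_popLoop idxs (x :: l) removed c = pvA_popLoop (idxs.map (· - 1)) l removed c := by
  induction idxs generalizing x l removed c with
  | nil => rfl
  | cons i rest ih =>
    have h1 : c + 1 ≤ i := hlo i (by simp)
    have h2 : i ≤ c + l.length := hhi i (by simp)
    obtain ⟨n, hn⟩ : ∃ n : Nat, (i - c) = (n : Int) ∧ 1 ≤ n ∧ n ≤ l.length := by
      refine ⟨(i - c).toNat, by omega, by omega, by omega⟩
    obtain ⟨hn1, hn2, hn3⟩ := hn
    obtain ⟨m, rfl⟩ : ∃ m : Nat, n = m + 1 := ⟨n - 1, by omega⟩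
    have hm : m < l.length := by omega
    have e1 : PySem.List.pop? (x :: l) (i - c) = some (l[m], x :: l.eraseIdx m) := by
      have hcons : m + 1 < (x :: l).length := by simp; omega
      rw [hn1, PySem.List.pop?_natCast (x :: l) (m + 1) hcons]
      simp
    have e2 : PySem.List.pop? l (i - 1 - c) = some (l[m], l.eraseIdx m) := by
      have : i - 1 - c = (m : Int) := by omega
      rw [this]; exact PySem.List.pop?_natCast l m hm
    simp only [pvA_popLoop, e1, e2, List.map_cons]
    rw [ih _ _ _ _ hp.of_cons]
    · intro j hj; have := (List.pairwise_cons.mp hp).1 j hj; omega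
    · intro j hj
      have := hhi j (by simp [hj])
      have hlen : (l.eraseIdx m).length = l.length - 1 := by
        rw [List.length_eraseIdx_of_lt hm]
      omega

theorem pvA_popLoop_J (g : List String) (lst removed : List (List String)) (c : Int) :
    pvA_popLoop ((pvJ g lst).map (fun k : Nat => (k : Int) + c)) lst removed c
      = removed ++ lst.filter (pvA_hit g) := by
  induction lst generalizing removed c with
  | nil => simp [pvJ_nil, pvA_popLoop]
  | cons x xs ih =>
    rw [pvJ_cons]
    have hmap : (((pvJ g xs).map (· + 1)).map (fun k : Nat => (k : Int) + c))
        = (pvJ g xs).map (fun k : Nat => (k : Int) + (c + 1)) := by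
      rw [List.map_map]
      apply List.map_congr_left
      intro a _
      simp only [Function.comp_apply]
      push_cast
      ring
    by_cases hx : pvA_hit g x
    · simp only [hx, if_true, List.map_append, List.map_cons,
        List.cons_append, List.nil_append, hmap]
      have e0 : ((0:Nat) : Int) + c - c = (0:Int) := by omega
      simp only [pvA_popLoop, e0, PySem.List.pop?_zero_cons]
      rw [ih]
      simp [hx]
    · simp only [hx, Bool.false_eq_true, if_false, List.nil_append, hmap]
      rw [pvA_popLoop_shift _ x xs removed c]
      · have hmap2 : (((pvJ g xs).map (fun k : Nat => (k : Int) + (c + 1))).map (· - 1))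
            = (pvJ g xs).map (fun k : Nat => (k : Int) + c) := by
          rw [List.map_map]
          apply List.map_congr_left
          intro a _
          simp only [Function.comp_apply]
          ring
        rw [hmap2, ih]
        simp [hx]
      · rw [List.pairwise_map]
        exact (pvJ_pairwise g xs).imp (by intro a b h; omega)
      · intro i hi
        obtain ⟨k, _, rfl⟩ := List.mem_map.mp hi
        omega
      · intro i hi
        obtain ⟨k, hk, rfl⟩ := List.mem_map.mp hi
        have := pvJ_mem_lt g xs hk
        omega

theorem pvA_eq_filter (lst : List (List String)) (g : List String) :
    remove_students lst g = lst.filter (pvA_hit g) := by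
  unfold remove_students
  rw [PySem.List.foldl_append_if_eq_filter, PySem.List.pyRange_one]
  simp only [Int.sub_zero, Int.toNat_natCast, List.nil_append]
  rw [List.filter_map]
  have hfil : (List.range lst.length).filter
        ((fun i => pvA_hit g ((PySem.List.pyGet? lst i).getD [])) ∘ (fun k : Nat => (0 : Int) + k))
      = pvJ g lst := by
    unfold pvJ
    apply List.filter_congr
    intro k hk
    have hk' : k < lst.length := List.mem_range.mp hk
    simp [PySem.List.pyGet?_natCast, List.getD_eq_getElem?_getD]
  rw [hfil]
  have hmap : (pvJ g lst).map ((fun k : Nat => (0 : Int) + k))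
      = (pvJ g lst).map (fun k : Nat => (k : Int) + 0) := by
    apply List.map_congr_left; intro a _; omega
  rw [hmap, pvA_popLoop_J]
  simp

-- invariant of B's single pass: positions ≥ the read index are still the original records
theorem pvB_loop_inv (g : List String) (lst : List (List String)) (k : Nat)
    (cur removed : List (List String)) (write : Nat)
    (hlen : cur.length = lst.length) (hsuff : ∀ j, k ≤ j → cur[j]? = lst[j]?) (hw : write ≤ k) :
    pvB_loop g (PySem.List.pyRange (k : Int) (lst.length : Int) 1) cur write removed
      = removed ++ (lst.drop k).filter (pvA_hit g) := by
  by_cases hk : k < lst.length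
  case neg =>
    rw [PySem.List.pyRange_one_eq_nil (by omega), List.drop_eq_nil_of_le (by omega)]
    simp [pvB_loop]
  case pos =>
    rw [PySem.List.pyRange_one_cons (by omega)]
    have hrec : (PySem.List.pyGet? cur (k : Int)).getD [] = lst[k] := by
      rw [PySem.List.pyGet?_natCast, hsuff k le_rfl, List.getElem?_eq_getElem hk]
      rfl
    have hdrop : lst.drop k = lst[k] :: lst.drop (k + 1) := List.drop_eq_getElem_cons hk
    have hcast : (k : Int) + 1 = ((k + 1 : Nat) : Int) := by push_cast; ring
    simp only [pvB_loop, hrec, hcast]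
    by_cases hx : pvA_hit g lst[k]
    · rw [if_pos (by exact hx)]
      rw [pvB_loop_inv g lst (k+1) cur (removed ++ [lst[k]]) write hlen
        (fun j hj => hsuff j (by omega)) (by omega)]
      rw [hdrop, List.filter_cons, if_pos hx]
      simp
    · rw [if_neg (by exact hx)]
      rw [pvB_loop_inv g lst (k+1) (cur.set write lst[k]) removed (write+1)
        (by simpa using hlen)
        (fun j hj => by rw [List.getElem?_set_ne (by omega)]; exact hsuff j (by omega))
        (by omega)]
      rw [hdrop, List.filter_cons, if_neg hx]
termination_by lst.length - k

theorem pvB_eq_filter (lst : List (List String)) (g : List String) :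
    remove_students_alt lst g = lst.filter (pvA_hit g) := by
  unfold remove_students_alt
  have h0 : (0 : Int) = ((0 : Nat) : Int) := rfl
  rw [h0, pvB_loop_inv g lst 0 lst [] 0 rfl (fun _ _ => rfl) le_rfl]
  simp

-- ===== VERDICT (by name: the statement is the Claim_ definition above) =====
theorem remove_students_spec : Claim_equal_remove_students := by
  intro lst g _ _
  unfold Spec_remove_students
  rw [pvA_eq_filter, pvB_eq_filter]
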